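-- pv_equiv track=rewrite | github.com/paser-group/ICPColocation | TaintPupCode/exploration.py | getResoName
-- ===== SOURCE A (Python) =====
-- def getResoName( reso_locs, reso_str, the_name = 'DEFAULT_NAME' ):
--     name_cnt_tracker = 0
--     for loc_tup in reso_locs:
--         name_cnt_tracker += 1
--         loc_str = reso_str[loc_tup[0]+1:loc_tup[-1]]
--         if( name_cnt_tracker == len(reso_locs) ):
--             splitted_strs  = loc_str.split('\n')
--             the_name = splitted_strs[0]
--     return the_name
-- ===== SOURCE B (Python) =====
-- def getResoName(reso_locs, reso_str, the_name='DEFAULT_NAME'):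
--     # Only the last location tuple determines the result: index it directly.
--     if reso_locs:
--         loc_tup = reso_locs[-1]
--         loc_str = reso_str[loc_tup[0] + 1:loc_tup[-1]]
--         the_name = loc_str.split('\n')[0]
--     return the_name
-- ===== Notes on version B (the rewrite author's own statement) =====
-- stated objective: simpler
-- what changed: Replaces the counter-driven loop that slices the string on every tuple with a direct access to the last tuple (reso_locs[-1]) followed by one slice and one split, guarded by an emptiness check that preserves the default return.
import Mathlib
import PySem

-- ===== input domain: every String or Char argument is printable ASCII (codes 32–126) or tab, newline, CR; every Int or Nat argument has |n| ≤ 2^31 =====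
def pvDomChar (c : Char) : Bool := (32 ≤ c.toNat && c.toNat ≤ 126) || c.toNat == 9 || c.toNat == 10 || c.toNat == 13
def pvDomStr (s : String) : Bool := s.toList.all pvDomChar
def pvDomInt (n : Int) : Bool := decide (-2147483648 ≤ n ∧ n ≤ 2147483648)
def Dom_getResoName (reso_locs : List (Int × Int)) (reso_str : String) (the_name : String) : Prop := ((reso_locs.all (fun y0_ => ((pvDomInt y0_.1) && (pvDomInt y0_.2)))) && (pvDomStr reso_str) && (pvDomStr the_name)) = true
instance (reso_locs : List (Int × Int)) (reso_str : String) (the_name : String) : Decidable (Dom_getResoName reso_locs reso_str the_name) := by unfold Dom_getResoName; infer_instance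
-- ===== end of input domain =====

-- B replaces A's counter-driven loop (which slices the string at every tuple) by direct
-- access to the last tuple plus one slice and one split: shorter and does less work per call.

-- ===== PORT A =====
-- A's loop: counter, slice on every tuple, name overwritten when the counter reaches len(reso_locs).
-- .split('\n') is PySem.Chars.splitOn (the sep ≠ "" form of split?); splitOn never returns [],
-- so Python's splitted_strs[0] (ported as pyGetD _ 0 with the current name as default) never raises.
def getResoName (reso_locs : List (Int × Int)) (reso_str : String) (the_name : String) : String :=
  (reso_locs.foldl
    (fun (st : Int × String) loc_tup =>
      let cnt := st.1 + 1
      let loc_str := PySem.Str.slice reso_str (some (loc_tup.1 + 1)) (some loc_tup.2)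
      if cnt = (reso_locs.length : Int) then
        (cnt, PySem.List.pyGetD ((PySem.Chars.splitOn loc_str.toList ['\n']).map String.ofList) 0 st.2)
      else (cnt, st.2))
    ((0 : Int), the_name)).2

-- ===== PORT B =====
-- B: if the list is nonempty, take reso_locs[-1] directly, slice once, split once, head.
def getResoName_alt (reso_locs : List (Int × Int)) (reso_str : String) (the_name : String) : String :=
  match reso_locs.getLast? with
  | none => the_name
  | some loc_tup =>
      let loc_str := PySem.Str.slice reso_str (some (loc_tup.1 + 1)) (some loc_tup.2)
      PySem.List.pyGetD ((PySem.Chars.splitOn loc_str.toList ['\n']).map String.ofList) 0 the_name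

-- ===== PRECONDITION & SPEC =====
def Spec_getResoName (reso_locs : List (Int × Int)) (reso_str : String) (the_name : String) (out : String) : Prop := out = getResoName_alt reso_locs reso_str the_name
instance (reso_locs : List (Int × Int)) (reso_str : String) (the_name : String) (out : String) : Decidable (Spec_getResoName reso_locs reso_str the_name out) := by unfold Spec_getResoName; infer_instance

-- ===== CLAIM (what is proved, stated in full; the proofs are below) =====
def Claim_equal_getResoName : Prop := ∀ (reso_locs : List (Int × Int)) (reso_str : String) (the_name : String), Dom_getResoName reso_locs reso_str the_name → Spec_getResoName reso_locs reso_str the_name (getResoName reso_locs reso_str the_name)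

-- ===== LEMMAS AND PROOFS =====

-- The last-taking extraction, named for the proofs only.
def pvLastName (s : String) (t : Int × Int) (nm : String) : String :=
  PySem.List.pyGetD
    ((PySem.Chars.splitOn (PySem.Str.slice s (some (t.1 + 1)) (some t.2)).toList ['\n']).map String.ofList)
    0 nm

-- A's loop, with the captured length generalised to an arbitrary bound n.
lemma pvLoopA_eq (n : Int) (s : String) :
    ∀ (xs : List (Int × Int)) (c : Int) (nm : String), c + xs.length ≤ n →
      (xs.foldl
        (fun (st : Int × String) loc_tup =>
          let cnt := st.1 + 1
          let loc_str := PySem.Str.slice s (some (loc_tup.1 + 1)) (some loc_tup.2)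
          if cnt = n then
            (cnt, PySem.List.pyGetD ((PySem.Chars.splitOn loc_str.toList ['\n']).map String.ofList) 0 st.2)
          else (cnt, st.2))
        (c, nm)).2
      = if hx : c + xs.length = n ∧ xs ≠ [] then pvLastName s (xs.getLast hx.2) nm else nm := by
  intro xs
  induction xs with
  | nil =>
    intro c nm _
    simp
  | cons a t ih =>
    intro c nm h
    rcases List.eq_nil_or_concat' t with rfl | ⟨t', b, rfl⟩
    · -- singleton: the counter reaches n iff c + 1 = n
      by_cases hc : c + 1 = n
      · simp [List.foldl, hc, pvLastName]
      · simp [List.foldl, hc]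
    · -- t nonempty: the first step cannot trigger (c + 1 < n), name stays nm
      have hne : (t' ++ [b]) ≠ ([] : List (Int × Int)) := by simp
      have hc : ¬ (c + 1 = n) := by
        have := List.length_append (as := t') (bs := [b])
        simp at h ⊢
        omega
      have hstep :
          (List.foldl
            (fun (st : Int × String) loc_tup =>
              let cnt := st.1 + 1
              let loc_str := PySem.Str.slice s (some (loc_tup.1 + 1)) (some loc_tup.2)
              if cnt = n then
                (cnt, PySem.List.pyGetD ((PySem.Chars.splitOn loc_str.toList ['\n']).map String.ofList) 0 st.2)
              else (cnt, st.2))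
            (c, nm) (a :: (t' ++ [b]))).2
          = (List.foldl
            (fun (st : Int × String) loc_tup =>
              let cnt := st.1 + 1
              let loc_str := PySem.Str.slice s (some (loc_tup.1 + 1)) (some loc_tup.2)
              if cnt = n then
                (cnt, PySem.List.pyGetD ((PySem.Chars.splitOn loc_str.toList ['\n']).map String.ofList) 0 st.2)
              else (cnt, st.2))
            (c + 1, nm) (t' ++ [b])).2 := by
        simp [List.foldl, hc]
      rw [hstep, ih (c + 1) nm (by simp at h ⊢; omega)]
      have hlast : (a :: (t' ++ [b])).getLast (by simp) = (t' ++ [b]).getLast hne := by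
        exact List.getLast_cons hne
      by_cases hx : c + 1 + (t' ++ [b]).length = n
      · have hx' : c + (a :: (t' ++ [b])).length = n := by simp at hx ⊢; omega
        rw [dif_pos ⟨hx, hne⟩, dif_pos ⟨hx', by simp⟩]
        rw [hlast]
      · have hx' : ¬ (c + (a :: (t' ++ [b])).length = n) := by simp at hx ⊢; omega
        rw [dif_neg (by tauto), dif_neg (by tauto)]

theorem getResoName_eq_alt (reso_locs : List (Int × Int)) (reso_str : String) (the_name : String) :
    getResoName reso_locs reso_str the_name = getResoName_alt reso_locs reso_str the_name := by
  unfold getResoName getResoName_alt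
  rw [pvLoopA_eq (reso_locs.length : Int) reso_str reso_locs 0 the_name (by simp)]
  cases h : reso_locs.getLast? with
  | none =>
    have : reso_locs = [] := List.getLast?_eq_none_iff.mp h
    subst this
    simp
  | some t =>
    have hne : reso_locs ≠ [] := by
      intro h0; subst h0; simp at h
    have hlast : reso_locs.getLast hne = t := by
      have := List.getLast?_eq_some_getLast (l := reso_locs) hne
      rw [h] at this; exact (Option.some_inj.mp this.symm)
    rw [dif_pos ⟨by ring, hne⟩, hlast]
    rfl

-- ===== VERDICT (by name: the statement is the Claim_ definition above) =====
theorem getResoName_spec : Claim_equal_getResoName := by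
  intro reso_locs reso_str the_name _
  unfold Spec_getResoName
  exact getResoName_eq_alt reso_locs reso_str the_name
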